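-- pv_equiv track=rewrite | github.com/SaiSudhaV/coding_platforms | subarray_occurances.py | solve
-- ===== SOURCE A (Python) =====
-- def solve(A, B, C):
--     n, i = len(A), 0
--     if B not in A and C not in A:
--         return (n * (n + 1)) // 2
--     while i < n:
--         A[i] = -1 if A[i] == C else 1 if A[i] == B else 0
--         i+=1
--     i, j, res = 0, 0, 0
--     for i in range(n):
--         k = 0
--         for j in range(i, n):
--             k += A[j]
--             if k == 0:
--                 res += 1
--     return res
-- ===== SOURCE B (Python) =====
-- def solve(A, B, C):
--     # single pass: count pairs of equal prefix sums with a hashmap; does not mutate A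
--     counts = {0: 1}
--     s = 0
--     res = 0
--     for x in A:
--         s += -1 if x == C else 1 if x == B else 0
--         res += counts.get(s, 0)
--         counts[s] = counts.get(s, 0) + 1
--     return res
-- ===== Notes on version B (the rewrite author's own statement) =====
-- stated objective: alternative
-- what changed: Replaced the double loop over all start/end indices (plus a separate closed-form early-return branch) by a single prefix-sum pass that counts equal prefix sums with a hashmap; B also does not mutate A in place as A does.
import Mathlib
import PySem

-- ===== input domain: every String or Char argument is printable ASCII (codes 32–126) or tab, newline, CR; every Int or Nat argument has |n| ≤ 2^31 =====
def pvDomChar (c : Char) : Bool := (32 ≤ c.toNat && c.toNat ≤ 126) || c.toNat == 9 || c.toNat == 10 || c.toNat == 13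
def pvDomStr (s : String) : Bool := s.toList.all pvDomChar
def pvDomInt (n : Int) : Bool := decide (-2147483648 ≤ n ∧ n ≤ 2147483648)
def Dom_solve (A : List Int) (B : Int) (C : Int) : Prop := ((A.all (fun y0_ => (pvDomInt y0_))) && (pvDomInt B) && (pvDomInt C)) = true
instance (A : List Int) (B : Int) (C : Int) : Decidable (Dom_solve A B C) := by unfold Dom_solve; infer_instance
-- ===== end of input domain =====

-- B replaces A's double loop over all subarrays (and its separate early-return
-- branch) by a single prefix-sum pass with a hashmap counting equal prefix sums.
-- A mutates its list argument in place; B does not: the equivalence proved is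
-- about the RETURN value only.

-- ===== PORT A =====
def solve (A : List Int) (B : Int) (C : Int) : Int :=
  let n : Int := PySem.List.len A
  if B ∉ A ∧ C ∉ A then
    PySem.Int.floordiv (n * (n + 1)) 2
  else
    -- the while loop rewrites A[i] in place; ported as the same per-element update
    let A1 : List Int := A.map (fun a => if a = C then -1 else if a = B then 1 else 0)
    (PySem.List.pyRange 0 n 1).foldl (fun res i =>
      ((PySem.List.pyRange i n 1).foldl
        (fun (p : Int × Int) j =>
          let k := p.1 + PySem.List.pyGetD A1 j 0   -- A[j], always in range here
          (k, if k = 0 then p.2 + 1 else p.2))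
        (0, res)).2) 0

-- ===== PORT B =====
def solve_alt (A : List Int) (B : Int) (C : Int) : Int :=
  (A.foldl (fun (st : PySem.Dict Int Int × Int × Int) x =>
      let s := st.2.1 + (if x = C then -1 else if x = B then 1 else 0)
      let res := st.2.2 + st.1.getD s 0
      (st.1.insert s (st.1.getD s 0 + 1), s, res))
    ((PySem.Dict.empty : PySem.Dict Int Int).insert 0 1, 0, 0)).2.2

-- ===== PRECONDITION & SPEC =====
def Spec_solve (A : List Int) (B : Int) (C : Int) (out : Int) : Prop := out = solve_alt A B C
instance (A : List Int) (B : Int) (C : Int) (out : Int) : Decidable (Spec_solve A B C out) := by unfold Spec_solve; infer_instance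

-- ===== CLAIM (what is proved, stated in full; the proofs are below) =====
def Claim_equal_solve : Prop := ∀ (A : List Int) (B : Int) (C : Int), Dom_solve A B C → Spec_solve A B C (solve A B C)

-- ===== LEMMAS AND PROOFS =====

def zpk (k0 : Int) : List Int → Int
  | [] => 0
  | x :: t => (if k0 + x = 0 then 1 else 0) + zpk (k0 + x) t

def Zc : List Int → Int
  | [] => 0
  | x :: t => zpk 0 (x :: t) + Zc t

def W : PySem.Dict Int Int → Int → List Int → Int
  | _, _, [] => 0
  | d, s, x :: t => d.getD (s + x) 0 + W (d.insert (s + x) (d.getD (s + x) 0 + 1)) (s + x) t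

def G : List Int → Int → List Int → Int
  | _, _, [] => 0
  | S, s, x :: t => (S.count (s + x) : Int) + G (S ++ [s + x]) (s + x) t

def cross : List Int → Int → List Int → Int
  | _, _, [] => 0
  | S2, s, x :: t => (S2.count (s + x) : Int) + cross S2 (s + x) t

theorem inner_fold (M : List Int) : ∀ (k0 res : Int),
    M.foldl (fun (p : Int × Int) x => (p.1 + x, if p.1 + x = 0 then p.2 + 1 else p.2)) (k0, res)
      = (k0 + M.sum, res + zpk k0 M) := by
  induction M with
  | nil => intro k0 res; simp [zpk]
  | cons x t ih =>
      intro k0 res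
      simp only [List.foldl_cons, ih, zpk, List.sum_cons, Prod.mk.injEq]
      refine ⟨by ring, ?_⟩
      split_ifs <;> ring

theorem outer_fold (L : List Int) : ∀ (res : Int),
    (List.range L.length).foldl (fun r k => r + zpk 0 (L.drop k)) res = res + Zc L := by
  induction L with
  | nil => intro res; simp [Zc]
  | cons x t ih =>
      intro res
      rw [List.length_cons, List.range_succ_eq_map, List.foldl_cons, List.foldl_map]
      simp only [List.drop_succ_cons, List.drop_zero]
      rw [ih]
      simp [Zc]; ring

theorem b_fold (M : List Int) : ∀ (d : PySem.Dict Int Int) (s res : Int),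
    (M.foldl (fun (st : PySem.Dict Int Int × Int × Int) x =>
        (st.1.insert (st.2.1 + x) (st.1.getD (st.2.1 + x) 0 + 1), st.2.1 + x,
          st.2.2 + st.1.getD (st.2.1 + x) 0)) (d, s, res)).2.2
      = res + W d s M := by
  induction M with
  | nil => intro d s res; simp [W]
  | cons x t ih =>
      intro d s res
      simp only [List.foldl_cons, ih, W]
      ring

theorem W_eq_G (M : List Int) : ∀ (d : PySem.Dict Int Int) (S : List Int) (s : Int),
    (∀ v, d.getD v 0 = (S.count v : Int)) → W d s M = G S s M := by
  induction M with
  | nil => intro d S s _; simp [W, G]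
  | cons x t ih =>
      intro d S s h
      simp only [W, G, h]
      congr 1
      apply ih
      intro v
      rw [PySem.Dict.getD_insert]
      by_cases hv : v = s + x
      · subst hv; simp [List.count_append]
      · simp only [hv, if_false, h, List.count_append, List.count_cons, List.count_nil]
        have hvs : ¬ s + x = v := fun e => hv e.symm
        simp [hvs]

theorem G_count_congr (M : List Int) : ∀ (S S' : List Int) (s : Int),
    (∀ v, S.count v = S'.count v) → G S s M = G S' s M := by
  induction M with
  | nil => intro _ _ _ _; simp [G]
  | cons x t ih =>
      intro S S' s h
      simp only [G, h]
      congr 1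
      apply ih
      intro v
      simp [List.count_append, h]

theorem G_append (M : List Int) : ∀ (S1 S2 : List Int) (s : Int),
    G (S1 ++ S2) s M = G S1 s M + cross S2 s M := by
  induction M with
  | nil => intro _ _ _; simp [G, cross]
  | cons x t ih =>
      intro S1 S2 s
      simp only [G, cross]
      rw [G_count_congr t ((S1 ++ S2) ++ [s + x]) ((S1 ++ [s + x]) ++ S2) _
            (by intro v
                simp only [List.count_append, List.count_cons, List.count_nil]
                omega),
          ih]
      simp only [List.count_append]
      push_cast
      ring

theorem cross_singleton (M : List Int) : ∀ (v s : Int),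
    cross [v] s M = zpk (s - v) M := by
  induction M with
  | nil => intro _ _; simp [cross, zpk]
  | cons x t ih =>
      intro v s
      simp only [cross, zpk]
      rw [show s - v + x = s + x - v by ring, ← ih]
      congr 1
      simp only [List.count_cons, List.count_nil, beq_iff_eq]
      by_cases h : s + x = v
      · have h2 : s - v + x = 0 := by omega
        simp [h]
      · have h2 : ¬ (s - v + x = 0) := by omega
        split_ifs <;> omega

theorem G_single (M : List Int) : ∀ (s : Int), G [s] s M = Zc M := by
  induction M with
  | nil => intro _; simp [G, Zc]
  | cons x t ih =>
      intro s
      simp only [G]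
      rw [G_count_congr t ([s] ++ [s + x]) ([s + x] ++ [s]) _
            (by intro v
                simp only [List.count_append, List.count_cons, List.count_nil]
                omega),
          G_append, ih, cross_singleton,
          show s + x - s = x by ring]
      simp only [Zc, zpk, zero_add]
      by_cases h : s + x = s
      · have hx : x = 0 := by omega
        simp [hx]
        ring
      · have hx : ¬ x = 0 := by omega
        simp [hx]
        ring

theorem zpk_zeros (M : List Int) (h : ∀ x ∈ M, x = 0) : zpk 0 M = (M.length : Int) := by
  induction M with
  | nil => simp [zpk]
  | cons x t ih =>
      have hx : x = 0 := h x (by simp)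
      simp only [zpk, hx, add_zero]
      rw [ih (fun y hy => h y (by simp [hy]))]
      simp
      ring

theorem Zc_zeros (M : List Int) (h : ∀ x ∈ M, x = 0) :
    2 * Zc M = (M.length : Int) * ((M.length : Int) + 1) := by
  induction M with
  | nil => simp [Zc]
  | cons x t ih =>
      have ih' := ih (fun y hy => h y (by simp [hy]))
      simp only [Zc, zpk_zeros _ h, List.length_cons]
      push_cast
      linarith [ih']

theorem solve_alt_eq (A : List Int) (B C : Int) :
    solve_alt A B C = Zc (A.map (fun a => if a = C then -1 else if a = B then 1 else 0)) := by
  unfold solve_alt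
  have hm : (A.foldl (fun (st : PySem.Dict Int Int × Int × Int) x =>
      let s := st.2.1 + (if x = C then -1 else if x = B then 1 else 0)
      let res := st.2.2 + st.1.getD s 0
      (st.1.insert s (st.1.getD s 0 + 1), s, res))
      ((PySem.Dict.empty : PySem.Dict Int Int).insert 0 1, 0, 0))
    = ((A.map (fun a => if a = C then -1 else if a = B then 1 else 0)).foldl
        (fun (st : PySem.Dict Int Int × Int × Int) x =>
          (st.1.insert (st.2.1 + x) (st.1.getD (st.2.1 + x) 0 + 1), st.2.1 + x,
            st.2.2 + st.1.getD (st.2.1 + x) 0))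
        ((PySem.Dict.empty : PySem.Dict Int Int).insert 0 1, 0, 0)) := by
    rw [List.foldl_map]
  rw [hm, b_fold]
  rw [W_eq_G _ _ [0] 0 (by
    intro v
    rw [PySem.Dict.getD_insert]
    by_cases hv : v = 0
    · simp [hv]
    · simp [hv, PySem.Dict.getD, PySem.Dict.get?, PySem.Dict.empty, List.count_cons]
      omega)]
  rw [G_single]
  ring

theorem solve_eq (A : List Int) (B C : Int) :
    solve A B C = Zc (A.map (fun a => if a = C then -1 else if a = B then 1 else 0)) := by
  unfold solve
  split_ifs with h
  · have hz : ∀ x ∈ A.map (fun a => if a = C then -1 else if a = B then (1:Int) else 0), x = 0 := by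
      intro x hx
      simp only [List.mem_map] at hx
      obtain ⟨a, ha, rfl⟩ := hx
      have hB : a ≠ B := fun e => h.1 (e ▸ ha)
      have hC : a ≠ C := fun e => h.2 (e ▸ ha)
      simp [hB, hC]
    have h2 := Zc_zeros _ hz
    rw [List.length_map] at h2
    rw [PySem.Int.floordiv_eq_ediv_of_pos (by norm_num)]
    simp only [PySem.List.len_eq]
    omega
  · simp only [PySem.List.len_eq]
    set L : List Int := A.map (fun a => if a = C then -1 else if a = B then 1 else 0) with hL
    have hlen : (A.length : Int) = (L.length : Int) := by simp [hL]
    rw [hlen]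
    rw [PySem.List.foldl_congr_mem _ _
        (fun (res i : Int) => res + zpk 0 (L.drop i.toNat)) _
      (by
        intro res i hi
        have h0 : (0:Int) ≤ i := (PySem.List.mem_pyRange_one.mp hi).1
        rw [PySem.List.foldl_pyRange_pyGetD' L 0
          (fun (p : Int × Int) x => (p.1 + x, if p.1 + x = 0 then p.2 + 1 else p.2)) _ h0,
          inner_fold])]
    rw [PySem.List.pyRange_zero_natCast, List.foldl_map]
    simp only [Int.toNat_natCast]
    rw [outer_fold]
    ring

-- ===== VERDICT (by name: the statement is the Claim_ definition above) =====
theorem solve_spec : Claim_equal_solve := by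
  intro A B C _
  unfold Spec_solve
  rw [solve_eq, solve_alt_eq]
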